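-- pv_equiv track=rewrite | github.com/cynthia247/ESEM2025 | Scripts/14.detecting_satd_keywords.py | detect_smell_keywords
-- ===== SOURCE A (Python) =====
-- def detect_smell_keywords(text, patterns):
--     text_lower = text.lower()
--     found = []
--     for smell, keywords in patterns.items():
--         for pattern in keywords:
--             if pattern in text_lower:
--                 found.append(smell)
--                 break  # Only need one match to assign the smell
--     return found
-- ===== SOURCE B (Python) =====
-- def detect_smell_keywords(text, patterns):
--     t = text.lower()
--     all_kws = set()
--     for kws in patterns.values():
--         all_kws.update(kws)
--     buckets = {}
--     for k in all_kws:
--         if k: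
--             buckets.setdefault(k[0], []).append(k)
--     matched = {k for k in all_kws if not k}
--     for i, c in enumerate(t):
--         for k in buckets.get(c, ()):
--             if k not in matched and t.startswith(k, i):
--                 matched.add(k)
--     return [smell for smell, kws in patterns.items() if not matched.isdisjoint(kws)]
-- ===== Notes on version B (the rewrite author's own statement) =====
-- stated objective: alternative
-- what changed: A runs a C-level substring search over the whole text for every keyword of every smell (keyword-outer); B builds a first-character index of the deduplicated keywords and makes a single position-outer pass over the lowered text, marking at each position the keywords that start there into one matched set, then emits the smells whose keyword list meets that set.
import Mathlib
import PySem

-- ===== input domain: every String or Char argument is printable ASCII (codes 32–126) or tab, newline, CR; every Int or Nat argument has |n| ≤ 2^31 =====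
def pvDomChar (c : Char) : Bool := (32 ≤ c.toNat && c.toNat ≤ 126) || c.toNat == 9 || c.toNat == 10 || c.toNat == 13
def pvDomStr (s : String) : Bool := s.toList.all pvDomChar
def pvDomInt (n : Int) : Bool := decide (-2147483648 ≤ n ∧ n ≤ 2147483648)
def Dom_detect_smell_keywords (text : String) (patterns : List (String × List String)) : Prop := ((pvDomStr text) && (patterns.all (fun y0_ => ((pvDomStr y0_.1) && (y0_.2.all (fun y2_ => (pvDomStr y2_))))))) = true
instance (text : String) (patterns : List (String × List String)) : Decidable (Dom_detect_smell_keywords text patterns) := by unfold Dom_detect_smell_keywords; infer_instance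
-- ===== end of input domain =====

-- B replaces A's keyword-outer substring scans by a single position-outer pass over the
-- lowered text: keywords are indexed by first character, each position marks the keywords
-- that start there into one matched set, and the smells whose keyword list meets that set
-- are emitted (objective: alternative; equal results proved, no speed claimed).

-- ===== PORT A =====
-- inner loop: 'for pattern in keywords: if pattern in text_lower: found.append(smell); break'
def pvInnerA (tl : List Char) (found : List String) (smell : String) : List String → List String
  | [] => found
  | k :: ks => if PySem.Chars.isIn k.toList tl then found ++ [smell] else pvInnerA tl found smell ks

def detect_smell_keywords (text : String) (patterns : List (String × List String)) : List String :=
  let text_lower := (PySem.Str.lower text).toList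
  patterns.foldl (fun found p => pvInnerA text_lower found p.1 p.2) []

-- ===== PORT B =====
-- all_kws = set(); for kws in patterns.values(): all_kws.update(kws)
def pvAllKws (patterns : List (String × List String)) : PySem.Set String :=
  patterns.foldl (fun s p => PySem.Set.update s p.2) PySem.Set.empty

-- buckets.setdefault(k[0], []).append(k): net effect buckets[k[0]] = buckets.get(k[0], []) + [k]
def pvBuckets (kws : List String) : PySem.Dict Char (List String) :=
  kws.foldl (fun d k =>
    match k.toList with
    | [] => d
    | c :: _ => d.insert c (d.getD c [] ++ [k])) PySem.Dict.empty

-- one pass of 'for k in bucket: if k not in matched and t.startswith(k, i): matched.add(k)'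
-- (t.startswith(k, i) for 0 ≤ i ≤ len(t) is 'k.toList is a prefix of t.drop i' — exact there)
def pvMarkAt (t : List Char) (i : Nat) (kws : List String) (matched : PySem.Set String) : PySem.Set String :=
  kws.foldl (fun m k =>
    if ¬ PySem.Set.contains m k = true ∧ PySem.Chars.startswith (t.drop i) k.toList then PySem.Set.add m k else m) matched

def detect_smell_keywords_alt (text : String) (patterns : List (String × List String)) : List String :=
  let t := (PySem.Str.lower text).toList
  let allKws := pvAllKws patterns
  let buckets := pvBuckets allKws
  -- matched = {k for k in all_kws if not k}  (the empty keyword occurs in every text)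
  let matched0 : PySem.Set String := PySem.Set.ofList (allKws.filter (fun k => k.toList.isEmpty))
  -- for i, c in enumerate(t): scan only the keywords that start with c
  let matched := (PySem.List.enumerate t 0).foldl
    (fun m p => pvMarkAt t p.1.toNat (buckets.getD p.2 []) m) matched0
  (patterns.filter (fun p => p.2.any (fun k => PySem.Set.contains matched k))).map Prod.fst

-- ===== PRECONDITION & SPEC =====
def Spec_detect_smell_keywords (text : String) (patterns : List (String × List String)) (out : List String) : Prop := out = detect_smell_keywords_alt text patterns
instance (text : String) (patterns : List (String × List String)) (out : List String) : Decidable (Spec_detect_smell_keywords text patterns out) := by unfold Spec_detect_smell_keywords; infer_instance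

-- ===== CLAIM (what is proved, stated in full; the proofs are below) =====
def Claim_equal_detect_smell_keywords : Prop := ∀ (text : String) (patterns : List (String × List String)), Dom_detect_smell_keywords text patterns → Spec_detect_smell_keywords text patterns (detect_smell_keywords text patterns)

-- ===== LEMMAS AND PROOFS =====

-- A's inner loop appends the smell iff some keyword occurs in the text
theorem pvInnerA_eq (tl : List Char) (found : List String) (smell : String) (ks : List String) :
    pvInnerA tl found smell ks =
      if ks.any (fun k => PySem.Chars.isIn k.toList tl) then found ++ [smell] else found := by
  induction ks with
  | nil => simp [pvInnerA]
  | cons k ks ih =>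
    simp only [pvInnerA, List.any_cons]
    by_cases h : PySem.Chars.isIn k.toList tl = true
    · simp [h]
    · simp [h, ih]

-- A's outer loop is a filter-then-project
theorem pvFoldA_eq (tl : List Char) (found : List String) (ps : List (String × List String)) :
    ps.foldl (fun found p => pvInnerA tl found p.1 p.2) found =
      found ++ (ps.filter (fun p => p.2.any (fun k => PySem.Chars.isIn k.toList tl))).map Prod.fst := by
  induction ps generalizing found with
  | nil => simp
  | cons p ps ih =>
    rw [List.foldl_cons, pvInnerA_eq]
    by_cases h : p.2.any (fun k => PySem.Chars.isIn k.toList tl) = true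
    · rw [if_pos h, ih, List.filter_cons]
      simp [h]
    · rw [if_neg h, ih, List.filter_cons]
      simp [h]

-- membership in the all-keywords set
theorem mem_pvAllKws_aux (ps : List (String × List String)) (s : PySem.Set String) (x : String) :
    x ∈ ps.foldl (fun s p => PySem.Set.update s p.2) s ↔ x ∈ s ∨ ∃ p ∈ ps, x ∈ p.2 := by
  induction ps generalizing s with
  | nil => simp
  | cons p ps ih => simp [ih, PySem.Set.mem_update]; tauto

theorem mem_pvAllKws (ps : List (String × List String)) (x : String) :
    x ∈ pvAllKws ps ↔ ∃ p ∈ ps, x ∈ p.2 := by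
  simp [pvAllKws, mem_pvAllKws_aux, PySem.Set.empty]

-- membership after one marking pass
theorem mem_pvMarkAt (t : List Char) (i : Nat) (kws : List String) (m : PySem.Set String) (x : String) :
    x ∈ pvMarkAt t i kws m ↔ x ∈ m ∨ (x ∈ kws ∧ PySem.Chars.startswith (t.drop i) x.toList = true) := by
  induction kws generalizing m with
  | nil => simp [pvMarkAt]
  | cons k ks ih =>
    simp only [pvMarkAt, List.foldl_cons] at *
    by_cases hc : (¬ PySem.Set.contains m k = true ∧ PySem.Chars.startswith (t.drop i) k.toList = true)
    · rw [if_pos hc, ih]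
      simp only [PySem.Set.mem_add, List.mem_cons]
      constructor
      · rintro ((h | rfl) | h)
        exacts [Or.inl h, Or.inr ⟨Or.inl rfl, hc.2⟩, Or.inr ⟨Or.inr h.1, h.2⟩]
      · rintro (h | ⟨rfl | hk, hs⟩)
        exacts [Or.inl (Or.inl h), Or.inl (Or.inr rfl), Or.inr ⟨hk, hs⟩]
    · rw [if_neg hc, ih]
      simp only [List.mem_cons]
      constructor
      · rintro (h | h)
        exacts [Or.inl h, Or.inr ⟨Or.inr h.1, h.2⟩]
      · rintro (h | ⟨rfl | hk, hs⟩)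
        · exact Or.inl h
        · have hm : PySem.Set.contains m x = true := by
            by_contra hm
            exact hc ⟨by simpa using hm, hs⟩
          exact Or.inl ((PySem.Set.contains_iff m x).mp hm)
        · exact Or.inr ⟨hk, hs⟩

-- membership in a first-character bucket
theorem mem_pvBuckets_aux (kws : List String) (d : PySem.Dict Char (List String)) (c : Char) (x : String) :
    x ∈ (kws.foldl (fun d k =>
        match k.toList with
        | [] => d
        | c' :: _ => d.insert c' (d.getD c' [] ++ [k])) d).getD c [] ↔
      x ∈ d.getD c [] ∨ (x ∈ kws ∧ x.toList.head? = some c) := by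
  induction kws generalizing d with
  | nil => simp
  | cons k ks ih =>
    rw [List.foldl_cons]
    cases hk : k.toList with
    | nil =>
      simp only [ih, List.mem_cons]
      constructor
      · rintro (h | h)
        exacts [Or.inl h, Or.inr ⟨Or.inr h.1, h.2⟩]
      · rintro (h | ⟨rfl | hx, hh⟩)
        · exact Or.inl h
        · rw [hk] at hh; cases hh
        · exact Or.inr ⟨hx, hh⟩
    | cons c' rest =>
      simp only [ih, List.mem_cons]
      by_cases hc : c = c'
      · subst hc
        rw [PySem.Dict.getD_insert_self]
        simp only [List.mem_append, List.mem_singleton]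
        constructor
        · rintro ((h | rfl) | h)
          exacts [Or.inl h, Or.inr ⟨Or.inl rfl, by rw [hk]; rfl⟩, Or.inr ⟨Or.inr h.1, h.2⟩]
        · rintro (h | ⟨rfl | hx, hh⟩)
          exacts [Or.inl (Or.inl h), Or.inl (Or.inr rfl), Or.inr ⟨hx, hh⟩]
      · rw [PySem.Dict.getD_insert, if_neg hc]
        constructor
        · rintro (h | h)
          exacts [Or.inl h, Or.inr ⟨Or.inr h.1, h.2⟩]
        · rintro (h | ⟨rfl | hx, hh⟩)
          · exact Or.inl h
          · rw [hk] at hh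
            simp at hh
            exact absurd hh.symm hc
          · exact Or.inr ⟨hx, hh⟩

theorem mem_pvBuckets (kws : List String) (c : Char) (x : String) :
    x ∈ (pvBuckets kws).getD c [] ↔ x ∈ kws ∧ x.toList.head? = some c := by
  rw [pvBuckets, mem_pvBuckets_aux]
  simp [PySem.Dict.getD_empty]

-- membership after the whole position scan
theorem mem_pvScan (t : List Char) (f : Char → List String) (m : PySem.Set String)
    (ps : List (Int × Char)) (x : String) :
    x ∈ ps.foldl (fun m p => pvMarkAt t p.1.toNat (f p.2) m) m ↔
      x ∈ m ∨ ∃ p ∈ ps, x ∈ f p.2 ∧ PySem.Chars.startswith (t.drop p.1.toNat) x.toList = true := by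
  induction ps generalizing m with
  | nil => simp
  | cons p ps ih => simp [ih, mem_pvMarkAt]; tauto

-- the matched set holds exactly the keywords that occur in the text
theorem mem_matched_iff (t : List Char) (kws : List String) (x : String) :
    x ∈ (PySem.List.enumerate t 0).foldl
        (fun m p => pvMarkAt t p.1.toNat ((pvBuckets kws).getD p.2 []) m)
        (PySem.Set.ofList (kws.filter (fun k => k.toList.isEmpty))) ↔
      x ∈ kws ∧ PySem.Chars.isIn x.toList t = true := by
  rw [mem_pvScan t (fun c => (pvBuckets kws).getD c [])]
  constructor
  · rintro (h | ⟨p, hp, hb, hs⟩)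
    · rw [PySem.Set.mem_ofList, List.mem_filter] at h
      refine ⟨h.1, ?_⟩
      rw [List.isEmpty_iff.mp h.2]
      exact PySem.Chars.isIn_nil t
    · rw [mem_pvBuckets] at hb
      exact ⟨hb.1, (PySem.Chars.exists_prefix_drop_iff_isIn _ _).mp
        ⟨p.1.toNat, (PySem.Chars.startswith_iff _ _).mp hs⟩⟩
  · rintro ⟨hk, hin⟩
    cases hx : x.toList with
    | nil =>
      refine Or.inl ?_
      rw [PySem.Set.mem_ofList, List.mem_filter]
      exact ⟨hk, by rw [List.isEmpty_iff, hx]⟩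
    | cons c0 l =>
      rcases (PySem.Chars.exists_prefix_drop_iff_isIn x.toList t).mpr hin with ⟨j, hpre⟩
      rw [hx] at hpre
      have hj : j < t.length := by
        by_contra hj
        rw [List.drop_eq_nil_of_le (by omega)] at hpre
        rcases hpre with ⟨r, hr⟩
        cases hr
      have hc0 : t[j] = c0 := by
        rcases hpre with ⟨r, hr⟩
        have : (t.drop j)[0]? = some c0 := by rw [← hr]; simp
        rw [List.getElem?_drop, Nat.add_zero] at this
        simpa [List.getElem?_eq_getElem hj] using this
      refine Or.inr ⟨((j : Int), c0), ?_, ?_, ?_⟩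
      · rw [PySem.List.mem_enumerate_iff]
        exact ⟨j, hj, by simp [hc0]⟩
      · rw [mem_pvBuckets]
        exact ⟨hk, by rw [hx]; rfl⟩
      · rw [PySem.Chars.startswith_iff]
        simpa [hx] using hpre

theorem contains_matched_eq (t : List Char) (kws : List String) (x : String) :
    PySem.Set.contains ((PySem.List.enumerate t 0).foldl
        (fun m p => pvMarkAt t p.1.toNat ((pvBuckets kws).getD p.2 []) m)
        (PySem.Set.ofList (kws.filter (fun k => k.toList.isEmpty)))) x = true ↔
      x ∈ kws ∧ PySem.Chars.isIn x.toList t = true := by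
  rw [PySem.Set.contains_iff, mem_matched_iff]

theorem detect_spec_aux (text : String) (patterns : List (String × List String)) :
    detect_smell_keywords text patterns = detect_smell_keywords_alt text patterns := by
  simp only [detect_smell_keywords, detect_smell_keywords_alt]
  rw [pvFoldA_eq, List.nil_append]
  apply congrArg (List.map Prod.fst)
  apply List.filter_congr
  intro p hp
  apply Bool.coe_iff_coe.mp
  simp only [List.any_eq_true]
  constructor
  · rintro ⟨k, hk, hin⟩
    exact ⟨k, hk, (contains_matched_eq _ _ _).mpr
      ⟨(mem_pvAllKws _ _).mpr ⟨p, hp, hk⟩, hin⟩⟩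
  · rintro ⟨k, hk, hin⟩
    exact ⟨k, hk, ((contains_matched_eq _ _ _).mp hin).2⟩

-- ===== VERDICT (by name: the statement is the Claim_ definition above) =====
theorem detect_smell_keywords_spec : Claim_equal_detect_smell_keywords := by
  intro text patterns _
  unfold Spec_detect_smell_keywords
  exact detect_spec_aux text patterns
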